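-- pv_equiv track=rewrite | github.com/JKay15/leanatlas | tests/contract/check_loop_wave_blocking_gate.py | _tail_consecutive
-- ===== SOURCE A (Python) =====
-- def _tail_consecutive(iterations: list[dict]) -> int:
--     last = None
--     run = 0
--     for rec in iterations:
--         fp = str(((rec.get("ai_review") or {}).get("finding_fingerprint")) or "")
--         if fp and fp == last:
--             run += 1
--         else:
--             run = 1 if fp else 0
--             last = fp if fp else None
--     return max(0, run)
-- ===== SOURCE B (Python) =====
-- def _tail_consecutive(iterations: list[dict]) -> int:
--     fps = [str(((rec.get("ai_review") or {}).get("finding_fingerprint")) or "") for rec in iterations]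
--     if not fps or not fps[-1]:
--         return 0
--     last = fps[-1]
--     n = 0
--     for fp in reversed(fps):
--         if fp != last:
--             break
--         n += 1
--     return n
-- ===== Notes on version B (the rewrite author's own statement) =====
-- stated objective: alternative
-- what changed: Instead of a stateful forward fold over (last, run) with reset logic, B extracts the fingerprint list once, then counts the trailing run by scanning in reverse from the last fingerprint, breaking on the first mismatch.
import Mathlib
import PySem

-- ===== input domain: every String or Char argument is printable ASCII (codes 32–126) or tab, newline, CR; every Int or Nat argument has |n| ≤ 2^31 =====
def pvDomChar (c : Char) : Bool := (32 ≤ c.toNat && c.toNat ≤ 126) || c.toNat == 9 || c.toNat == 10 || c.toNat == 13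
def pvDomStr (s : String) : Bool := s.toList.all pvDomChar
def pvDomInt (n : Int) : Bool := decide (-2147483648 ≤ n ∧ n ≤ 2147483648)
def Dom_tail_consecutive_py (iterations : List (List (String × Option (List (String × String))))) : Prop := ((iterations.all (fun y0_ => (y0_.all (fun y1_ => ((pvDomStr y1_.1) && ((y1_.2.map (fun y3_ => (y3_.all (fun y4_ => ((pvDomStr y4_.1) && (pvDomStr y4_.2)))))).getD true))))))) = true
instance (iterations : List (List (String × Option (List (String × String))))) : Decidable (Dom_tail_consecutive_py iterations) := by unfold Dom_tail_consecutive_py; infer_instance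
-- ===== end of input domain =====

-- B replaces A's stateful (last, run) forward fold by a reverse scan counting the trailing run of the last fingerprint (alternative decomposition, same cost).
-- shared by both ports: fp = str(((rec.get("ai_review") or {}).get("finding_fingerprint")) or "")
def pvFp (rec : List (String × Option (List (String × String)))) : String :=
  let ai : List (String × String) :=
    match PySem.Dict.get? (PySem.Dict.mk rec) "ai_review" with
    | some (some d) => d
    | _ => []                         -- `or {}`: missing key or None both give {}
  match PySem.Dict.get? (PySem.Dict.mk ai) "finding_fingerprint" with
  | some s => s                       -- `or ""` maps "" to "" (identity here); str() on a str is identity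
  | none => ""

-- ===== PORT A =====
def tail_consecutive_py (iterations : List (List (String × Option (List (String × String))))) : Int :=
  let st := iterations.foldl (fun (st : Option String × Int) rec =>
    let fp := pvFp rec
    if fp ≠ "" ∧ some fp = st.1 then
      (st.1, st.2 + 1)
    else
      ((if fp ≠ "" then some fp else none), (if fp ≠ "" then (1 : Int) else 0)))
    (none, 0)
  max 0 st.2

-- ===== PORT B =====
def pvCountTail (last : String) : List String → Int
  | [] => 0
  | fp :: rest => if fp = last then pvCountTail last rest + 1 else 0

def tail_consecutive_py_alt (iterations : List (List (String × Option (List (String × String))))) : Int :=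
  let fps := iterations.map pvFp
  match fps.getLast? with
  | none => 0                          -- not fps
  | some last => if last = "" then 0 else pvCountTail last fps.reverse

-- ===== PRECONDITION & SPEC =====
def Spec_tail_consecutive_py (iterations : List (List (String × Option (List (String × String))))) (out : Int) : Prop := out = tail_consecutive_py_alt iterations
instance (iterations : List (List (String × Option (List (String × String))))) (out : Int) : Decidable (Spec_tail_consecutive_py iterations out) := by unfold Spec_tail_consecutive_py; infer_instance

-- ===== CLAIM (what is proved, stated in full; the proofs are below) =====
def Claim_equal_tail_consecutive_py : Prop := ∀ (iterations : List (List (String × Option (List (String × String))))), Dom_tail_consecutive_py iterations → Spec_tail_consecutive_py iterations (tail_consecutive_py iterations)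

-- ===== LEMMAS AND PROOFS =====

-- A's fold step on a fingerprint
def pvStep (st : Option String × Int) (fp : String) : Option String × Int :=
  if fp ≠ "" ∧ some fp = st.1 then (st.1, st.2 + 1)
  else ((if fp ≠ "" then some fp else none), (if fp ≠ "" then (1 : Int) else 0))

-- the value B computes, as a function of the fingerprint list
def pvTail (fps : List String) : Option String × Int :=
  match fps.getLast? with
  | none => (none, 0)
  | some f => if f = "" then (none, 0) else (some f, pvCountTail f fps.reverse)

theorem pvCountTail_nonneg (last : String) (l : List String) : 0 ≤ pvCountTail last l := by
  induction l with
  | nil => simp [pvCountTail]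
  | cons fp rest ih => simp only [pvCountTail]; split <;> omega

theorem pvCountTail_zero (f : String) (l : List String) (h : l.head? ≠ some f) :
    pvCountTail f l = 0 := by
  cases l with
  | nil => rfl
  | cons x rest =>
    have hx : x ≠ f := by intro hx; exact h (by simp [List.head?, hx])
    simp [pvCountTail, hx]

theorem pvFold_eq_tail (fps : List String) :
    fps.foldl pvStep (none, 0) = pvTail fps := by
  induction fps using List.reverseRecOn with
  | nil => rfl
  | append_singleton l f ih =>
    rw [List.foldl_append, ih]
    by_cases hf : f = ""
    · subst hf
      simp [pvTail, pvStep]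
    · simp only [pvTail, List.getLast?_append, List.getLast?_singleton,
        List.reverse_append, List.reverse_singleton, List.singleton_append, List.foldl]
      by_cases hlast : l.getLast? = some f
      · have hl : l ≠ [] := by intro h; simp [h] at hlast
        simp only [hlast, if_neg hf, pvStep, pvCountTail]
        simp [hf]
      · -- last of l is not f (or l empty): run restarts at 1
        have hcount : pvCountTail f l.reverse = 0 := by
          apply pvCountTail_zero
          rw [List.head?_reverse]
          exact hlast
        simp only [pvStep]
        cases h : l.getLast? with
        | none =>
          have : l = [] := List.getLast?_eq_none_iff.mp h
          subst this
          simp [pvCountTail, hf]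
        | some g =>
          by_cases hg : g = ""
          · subst hg
            have hne : ¬ ((f ≠ "") ∧ some f = (none : Option String)) := by simp
            simp only [h, if_pos (by simp [hf] : f ≠ "")]
            simp [pvCountTail, hcount, hf]
          · have hgf : f ≠ g := by intro hc; subst hc; exact hlast h
            have hne : ¬ ((f ≠ "") ∧ some f = some g) := by
              intro ⟨_, hc⟩; exact hgf (Option.some.inj hc)
            simp only [h, if_neg hg, if_neg hne, if_pos (by simp [hf] : f ≠ "")]
            simp [pvCountTail, hcount, hf]

-- ===== VERDICT (by name: the statement is the Claim_ definition above) =====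
theorem tail_consecutive_py_spec : Claim_equal_tail_consecutive_py := by
  intro iterations _
  unfold Spec_tail_consecutive_py tail_consecutive_py tail_consecutive_py_alt
  have hA : iterations.foldl (fun (st : Option String × Int) rec =>
      let fp := pvFp rec
      if fp ≠ "" ∧ some fp = st.1 then (st.1, st.2 + 1)
      else ((if fp ≠ "" then some fp else none), (if fp ≠ "" then (1 : Int) else 0)))
      (none, 0) = (iterations.map pvFp).foldl pvStep (none, 0) := by
    rw [List.foldl_map]
    rfl
  rw [hA, pvFold_eq_tail]
  generalize iterations.map pvFp = fps
  unfold pvTail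
  cases h : fps.getLast? with
  | none => simp [h]
  | some f =>
    by_cases hf : f = ""
    · simp [h, hf]
    · have hnn := pvCountTail_nonneg f fps.reverse
      simp only [h, if_neg hf]
      exact max_eq_right hnn
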